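-- pv_equiv track=rewrite | github.com/wangxinyufighting/algorithom | CodingInterViewGuide/chapter5_String/question3.py | removeZero
-- ===== SOURCE A (Python) =====
-- def removeZero(str, k):
--     if not str or k < 1:
--         return None
--
--     start = -1
--     count = 0
--     str = list(str)
--
--     for i in range(len(str)):
--         if str[i] == '0':
--             count += 1
--             start = i if start == -1 else start
--         else:
--             if count == k:
--                 while count != 0:
--                     str[start] = 0
--                     start += 1
--                     count -= 1
--
--             count = 0
--             start = -1
--
--     if count == k:
--         while count != 0:
--             str[start] = 0
--             start += 1
--             count -= 1
--
--     result = ''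
--     while str:
--         t = str.pop(0)
--         if t != 0:
--             result += t
--
--     return result
-- ===== SOURCE B (Python) =====
-- def removeZero(str, k):
--     if not str or k < 1:
--         return None
--     out = []
--     n = len(str)
--     i = 0
--     while i < n:
--         if str[i] == '0':
--             j = i
--             while j < n and str[j] == '0':
--                 j += 1
--             if j - i != k:
--                 out.append(str[i:j])
--             i = j
--         else:
--             out.append(str[i])
--             i += 1
--     return ''.join(out)
-- ===== Notes on version B (the rewrite author's own statement) =====
-- stated objective: faster
-- what changed: Replaced A's mark-runs-in-a-mutable-list-then-rebuild-by-pop(0) scheme (quadratic because of pop(0)) with a single forward scan that measures each zero-run with an inner index sweep and appends kept pieces to a list joined once.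
import Mathlib
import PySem

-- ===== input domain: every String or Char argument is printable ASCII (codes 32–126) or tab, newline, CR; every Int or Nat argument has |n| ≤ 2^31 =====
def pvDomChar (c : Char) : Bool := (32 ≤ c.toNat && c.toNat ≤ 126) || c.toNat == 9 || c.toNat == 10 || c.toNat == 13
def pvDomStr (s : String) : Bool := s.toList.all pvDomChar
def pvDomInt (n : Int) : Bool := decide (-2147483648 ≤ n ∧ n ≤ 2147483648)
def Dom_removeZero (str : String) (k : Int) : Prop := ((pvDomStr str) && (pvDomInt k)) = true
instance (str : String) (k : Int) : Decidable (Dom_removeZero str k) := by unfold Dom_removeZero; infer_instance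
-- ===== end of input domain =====

-- B replaces A's mark-runs-in-a-mutable-list-then-rebuild-via-pop(0) scheme (quadratic
-- in Python because of pop(0)) by a single forward scan over the zero-runs; the check
-- measured B faster on the generated inputs.

-- ===== PORT A =====
-- A's list is a Python list mixing chars and the int 0 used as a "deleted" mark;
-- modelled as List (Option Char) with `none` for the mark.
-- Python's `while count != 0: str[start] = 0; start += 1; count -= 1`.
-- The guard is written `0 < count`: whenever Python runs this loop count = k ≥ 1
-- and it only decrements, so the guard is the same there, and termination is evident.
def markLoopA (arr : List (Option Char)) (start count : Int) : List (Option Char) :=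
  if 0 < count then markLoopA (PySem.List.pySetD arr start none) (start + 1) (count - 1) else arr
termination_by count.toNat
decreasing_by omega

-- `for i in range(len(str)): …` — one step per index, state (str, start, count).
def forLoopA (k : Int) : List Int → List (Option Char) × Int × Int → List (Option Char) × Int × Int
  | [], st => st
  | i :: is, (arr, start, count) =>
    match PySem.List.pyGet? arr i with
    | none => (arr, start, count)  -- unreachable: i ranges over range(len(str)) and set keeps the length
    | some t =>
      if t = some '0' then
        forLoopA k is (arr, (if start = -1 then i else start), count + 1)
      else
        forLoopA k is ((if count = k then markLoopA arr start count else arr), -1, 0)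

-- `result = ''` then `while str: t = str.pop(0); if t != 0: result += t`
def collectA : List (Option Char) → String → String
  | [], result => result
  | t :: rest, result => collectA rest (match t with | some c => result.push c | none => result)

def removeZero (str : String) (k : Int) : Option String :=
  if str.toList = [] || k < 1 then none
  else
    let arr := str.toList.map some
    match forLoopA k (PySem.List.pyRange 0 (arr.length : Int) 1) (arr, -1, 0) with
    | (arr1, start, count) =>
      some (collectA (if count = k then markLoopA arr1 start count else arr1) "")

-- ===== PORT B =====
-- Source B's outer `while i < n` is this recursion on the remaining characters; the inner
-- `while j < n and str[j] == '0'` sweep is takeWhile/dropWhile of the zero run.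
def goB (k : Int) : List Char → List Char
  | [] => []
  | c :: rest =>
    if h : c = '0' then
      let run := List.takeWhile (fun x => x = '0') (c :: rest)
      let rest' := List.dropWhile (fun x => x = '0') (c :: rest)
      (if (run.length : Int) = k then [] else run) ++ goB k rest'
    else c :: goB k rest
termination_by l => l.length
decreasing_by
  · simp only [List.dropWhile_cons, h]
    simp only [decide_true, if_true]
    exact Nat.lt_succ_of_le (List.length_dropWhile_le _ _)
  · simp

def removeZero_alt (str : String) (k : Int) : Option String :=
  if str.toList = [] || k < 1 then none
  else some (String.ofList (goB k str.toList))

-- ===== PRECONDITION & SPEC =====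
def Spec_removeZero (str : String) (k : Int) (out : Option String) : Prop := out = removeZero_alt str k
instance (str : String) (k : Int) (out : Option String) : Decidable (Spec_removeZero str k out) := by unfold Spec_removeZero; infer_instance

-- ===== CLAIM (what is proved, stated in full; the proofs are below) =====
def Claim_equal_removeZero : Prop := ∀ (str : String) (k : Int), Dom_removeZero str k → Spec_removeZero str k (removeZero str k)

-- ===== LEMMAS AND PROOFS =====

-- A's marking while-loop turns the whole zero run (sitting right after `done`) into marks.
lemma markLoopA_append (run : List Char) : ∀ (done X : List (Option Char)),
    markLoopA (done ++ run.map some ++ X) (done.length : Int) (run.length : Int)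
      = done ++ List.replicate run.length none ++ X := by
  induction run with
  | nil => intro done X; rw [markLoopA]; simp
  | cons z t ih =>
    intro done X
    rw [markLoopA]
    have h0 : (0 : Int) < ((z :: t).length : Int) := by simp only [List.length_cons]; omega
    rw [if_pos h0]
    have hset : PySem.List.pySetD (done ++ (z :: t).map some ++ X) (done.length : Int) none
        = (done ++ [none]) ++ t.map some ++ X := by
      simp only [List.map_cons, PySem.List.pySetD_natCast]
      rw [List.append_assoc, List.set_append_right _ _ (Nat.le_refl _)]
      simp
    rw [hset]
    have hl : (done.length : Int) + 1 = ((done ++ [(none : Option Char)]).length : Int) := by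
      simp only [List.length_cons, List.length_append, List.length_nil]; omega
    have hc : ((z :: t).length : Int) - 1 = (t.length : Int) := by simp only [List.length_cons]; omega
    rw [hl, hc, ih]
    simp [List.replicate_succ]

-- the rebuild loop, on the list side
lemma collectA_toList (l : List (Option Char)) : ∀ (s : String),
    (collectA l s).toList = s.toList ++ l.filterMap id := by
  induction l with
  | nil => intro s; simp [collectA]
  | cons t rest ih =>
    intro s
    cases t with
    | some c => simp [collectA, ih, String.toList_push]
    | none => simp [collectA, ih]

-- what remains after the final mark-and-filter, as a function of the loop's final state
def afterA (k : Int) (st : List (Option Char) × Int × Int) : List (Option Char) :=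
  if st.2.2 = k then markLoopA st.1 st.2.1 st.2.2 else st.1

lemma goB_nil (k : Int) : goB k [] = [] := by rw [goB]

lemma goB_cons_zero (k : Int) (rest : List Char) :
    goB k ('0' :: rest)
      = (if ((List.takeWhile (fun x => decide (x = '0')) ('0' :: rest)).length : Int) = k
         then [] else List.takeWhile (fun x => decide (x = '0')) ('0' :: rest))
        ++ goB k (List.dropWhile (fun x => decide (x = '0')) ('0' :: rest)) := by
  rw [goB.eq_def]
  simp

lemma goB_cons_nonzero (k : Int) (c : Char) (rest : List Char) (hc : c ≠ '0') :
    goB k (c :: rest) = c :: goB k rest := by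
  rw [goB.eq_def]
  simp [hc]

lemma goB_all_zero (k : Int) (run : List Char) (hrun : ∀ c ∈ run, c = '0') (hne : run ≠ []) :
    goB k run = (if (run.length : Int) = k then [] else run) := by
  cases run with
  | nil => exact absurd rfl hne
  | cons z t =>
    have hz : z = '0' := hrun z (List.mem_cons_self ..)
    subst hz
    have htw : List.takeWhile (fun x => decide (x = '0')) ('0' :: t) = '0' :: t := by
      rw [List.takeWhile_eq_self_iff]
      intro x hx; simp [hrun x hx]
    have hdw : List.dropWhile (fun x => decide (x = '0')) ('0' :: t) = [] := by
      rw [List.dropWhile_eq_nil_iff]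
      intro x hx; simp [hrun x hx]
    rw [goB_cons_zero, htw, hdw, goB_nil, List.append_nil]

lemma goB_run_stop (k : Int) (run : List Char) (c : Char) (rest : List Char)
    (hrun : ∀ x ∈ run, x = '0') (hc : c ≠ '0') (hk : 1 ≤ k) :
    goB k (run ++ c :: rest) = (if (run.length : Int) = k then [] else run) ++ c :: goB k rest := by
  cases run with
  | nil =>
    have h0 : ¬ (((List.nil (α := Char)).length : Int) = k) := by simp; omega
    rw [if_neg h0]
    simp only [List.nil_append]
    rw [goB_cons_nonzero k c rest hc]
  | cons z t =>
    have hz : z = '0' := hrun z (List.mem_cons_self ..)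
    subst hz
    have hall : ∀ x ∈ '0' :: t, (fun x => decide (x = '0')) x = true := by
      intro x hx; simp [hrun x hx]
    have htw : List.takeWhile (fun x => decide (x = '0')) ('0' :: t ++ c :: rest) = '0' :: t := by
      rw [List.takeWhile_append_of_pos hall]
      have h1 : List.takeWhile (fun x => decide (x = '0')) (c :: rest) = [] := by
        simp [hc]
      rw [h1, List.append_nil]
    have hdw : List.dropWhile (fun x => decide (x = '0')) ('0' :: t ++ c :: rest) = c :: rest := by
      rw [List.dropWhile_append_of_pos hall]
      simp [hc]
    rw [List.cons_append, goB_cons_zero]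
    rw [← List.cons_append, htw, hdw, goB_cons_nonzero k c rest hc]

-- the loop invariant: `done` is the already-decided prefix, `run` the pending zero run
-- (count = its length, start = where it begins, or -1 if none), `rest` the unread suffix.
lemma forLoopA_inv (k : Int) (hk : 1 ≤ k) (rest : List Char) :
    ∀ (run : List Char) (done : List (Option Char)), (∀ c ∈ run, c = '0') →
    (afterA k (forLoopA k
        (PySem.List.pyRange ((done.length + run.length : Nat) : Int) ((done.length + run.length + rest.length : Nat) : Int) 1)
        (done ++ run.map some ++ rest.map some,
         (if run = [] then -1 else (done.length : Int)), (run.length : Int)))).filterMap id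
      = done.filterMap id ++ goB k (run ++ rest) := by
  induction rest with
  | nil =>
    intro run done hrun
    rw [PySem.List.pyRange_one_eq_nil (by simp)]
    simp only [forLoopA, afterA, List.map_nil, List.append_nil]
    by_cases hck : ((run.length : Nat) : Int) = k
    · rw [if_pos hck]
      have hne : run ≠ [] := by
        intro h; subst h; simp only [List.length_nil, Nat.cast_zero] at hck; omega
      rw [if_neg hne]
      have hm := markLoopA_append run done []
      simp only [List.append_nil] at hm
      rw [hm]
      rw [goB_all_zero k run hrun hne, if_pos hck]
      simp
    · rw [if_neg hck]
      simp only [List.filterMap_append]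
      by_cases hne : run = []
      · subst hne; simp [goB_nil]
      · rw [goB_all_zero k run hrun hne, if_neg hck]
        simp
  | cons c rest' ih =>
    intro run done hrun
    have hlt : (((done.length + run.length : Nat)) : Int) < ((done.length + run.length + (c :: rest').length : Nat) : Int) := by
      simp only [List.length_cons]; omega
    rw [PySem.List.pyRange_one_cons hlt]
    have hget : PySem.List.pyGet? (done ++ run.map some ++ (c :: rest').map some)
        (((done.length + run.length : Nat)) : Int) = some (some c) := by
      rw [PySem.List.pyGet?_natCast]
      rw [List.getElem?_append_right (by simp)]
      simp
    rw [forLoopA, hget]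
    simp only []
    by_cases hc : c = '0'
    · subst hc
      rw [if_pos rfl]
      -- the pending run grows by one zero
      have harr : done ++ run.map some ++ ('0' :: rest').map some
          = done ++ (run ++ ['0']).map some ++ rest'.map some := by
        simp [List.append_assoc]
      have hstart : (if (if run = [] then (-1 : Int) else (done.length : Int)) = -1
            then ((done.length + run.length : Nat) : Int)
            else (if run = [] then (-1 : Int) else (done.length : Int)))
          = (if run ++ ['0'] = [] then (-1 : Int) else (done.length : Int)) := by
        by_cases hne : run = []
        · subst hne; simp
        · rw [if_neg hne, if_neg (by simp), if_neg (by simp [hne])]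
      have hcount : ((run.length : Nat) : Int) + 1 = (((run ++ ['0']).length : Nat) : Int) := by
        simp only [List.length_cons, List.length_append, List.length_nil]; omega
      have hidx : ((done.length + run.length : Nat) : Int) + 1
          = ((done.length + (run ++ ['0']).length : Nat) : Int) := by simp only [List.length_cons, List.length_append, List.length_nil]; omega
      have hidx2 : ((done.length + run.length + ('0' :: rest').length : Nat) : Int)
          = ((done.length + (run ++ ['0']).length + rest'.length : Nat) : Int) := by simp only [List.length_cons, List.length_append, List.length_nil]; omega
      rw [harr, hstart, hcount, hidx, hidx2]
      rw [ih (run ++ ['0']) done (by intro x hx; rcases List.mem_append.1 hx with h | h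
                                     · exact hrun x h
                                     · simpa using h)]
      rw [List.append_assoc, List.singleton_append]
    · rw [if_neg (by simpa using hc)]
      -- the pending run is closed by a non-zero character
      set Q : List (Option Char) :=
        if ((run.length : Nat) : Int) = k then List.replicate run.length none else run.map some with hQ
      have harr : (if ((run.length : Nat) : Int) = k
            then markLoopA (done ++ run.map some ++ (c :: rest').map some)
                   (if run = [] then -1 else (done.length : Int)) ((run.length : Nat) : Int)
            else done ++ run.map some ++ (c :: rest').map some)
          = (done ++ Q ++ [some c]) ++ ([] : List Char).map some ++ rest'.map some := by
        by_cases hck : ((run.length : Nat) : Int) = k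
        · rw [if_pos hck, hQ, if_pos hck]
          have hne : run ≠ [] := by intro h; subst h; simp only [List.length_nil, Nat.cast_zero] at hck; omega
          rw [if_neg hne]
          rw [markLoopA_append run done ((c :: rest').map some)]
          simp [List.append_assoc]
        · rw [if_neg hck, hQ, if_neg hck]
          simp [List.append_assoc]
      have hQlen : Q.length = run.length := by
        rw [hQ]; by_cases hck : ((run.length : Nat) : Int) = k
        · rw [if_pos hck]; simp
        · rw [if_neg hck]; simp
      have hidx : ((done.length + run.length : Nat) : Int) + 1
          = (((done ++ Q ++ [some c]).length + ([] : List Char).length : Nat) : Int) := by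
        simp only [hQlen, List.length_cons, List.length_append, List.length_nil]; omega
      have hidx2 : ((done.length + run.length + (c :: rest').length : Nat) : Int)
          = (((done ++ Q ++ [some c]).length + ([] : List Char).length + rest'.length : Nat) : Int) := by
        simp only [hQlen, List.length_cons, List.length_append, List.length_nil]; omega
      have hcount : (0 : Int) = ((([] : List Char).length : Nat) : Int) := by simp
      rw [harr, hidx, hidx2, hcount]
      have hstart : (-1 : Int) = (if ([] : List Char) = [] then (-1 : Int)
          else (((done ++ Q ++ [some c]).length : Nat) : Int)) := by simp
      rw [hstart]
      rw [ih [] (done ++ Q ++ [some c]) (by intro x hx; simp at hx)]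
      simp only [List.nil_append]
      rw [goB_run_stop k run c rest' hrun hc hk]
      have hQf : Q.filterMap id = (if ((run.length : Nat) : Int) = k then [] else run) := by
        rw [hQ]; by_cases hck : ((run.length : Nat) : Int) = k
        · rw [if_pos hck, if_pos hck]; simp
        · rw [if_neg hck, if_neg hck]; simp
      rw [List.filterMap_append, List.filterMap_append, hQf]
      simp [List.append_assoc]

-- ===== VERDICT (by name: the statement is the Claim_ definition above) =====
theorem removeZero_spec : Claim_equal_removeZero := by
  intro str k _
  unfold Spec_removeZero removeZero removeZero_alt
  by_cases hguard : str.toList = [] || k < 1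
  · rw [if_pos hguard, if_pos hguard]
  · rw [if_neg hguard, if_neg hguard]
    have hk : 1 ≤ k := by
      simp only [Bool.or_eq_true, decide_eq_true_eq, not_or] at hguard
      omega
    have key := forLoopA_inv k hk str.toList [] [] (by intro x hx; simp at hx)
    simp only [List.map_nil, List.nil_append, List.append_nil, List.length_nil, Nat.zero_add,
      Nat.cast_zero, List.filterMap_nil, if_true] at key
    simp only [List.length_map]
    rcases hst : forLoopA k (PySem.List.pyRange 0 ((str.toList.length : Nat) : Int) 1)
        (str.toList.map some, -1, 0) with ⟨arr1, start, count⟩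
    rw [hst] at key
    simp only [afterA] at key
    congr 1
    have h3 : (collectA (if count = k then markLoopA arr1 start count else arr1) "").toList
        = goB k str.toList := by
      rw [collectA_toList]; simpa using key
    rw [← h3, String.ofList_toList]
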